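-- pv_equiv track=rewrite | github.com/benquick123/code-profiling | code/batch-1/vse-naloge-brez-testov/DN5-M-36.py | custva
-- ===== SOURCE A (Python) =====
-- def custva(tviti, hastagi):
--     hashtags = []
--     response = []
--     for tvit in tviti:
--         temp_tvit = tvit.split(":")
--         author = temp_tvit[0]
--         temp_tvit = tvit.split(" ")
--         for word in temp_tvit:
--             if word[0] == "#":
--                 hashtags.append((author, word[1:]))
--     for aut, feeling in hashtags:
--         for x in hastagi:
--             if feeling ==x:
--                 if aut not in response:
--                     response.append(aut)
--         response = sorted(response)
--     return response
-- ===== SOURCE B (Python) =====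
-- def custva(tviti, hastagi):
--     index = {}
--     for tvit in tviti:
--         author = tvit.split(":")[0]
--         for word in tvit.split(" "):
--             if word[0] == "#":
--                 index.setdefault(word[1:], set()).add(author)
--     result = set()
--     for h in hastagi:
--         result |= index.get(h, set())
--     return sorted(result)
-- ===== Notes on version B (the rewrite author's own statement) =====
-- stated objective: alternative
-- what changed: A scans the whole hashtag-query list once per collected (author, hashtag) pair and re-sorts the accumulating response after every pair; B builds an inverted index (hashtag -> set of authors) in one pass over the tweets, unions the indexed author sets over the queried hashtags, and sorts once at the end.
import Mathlib
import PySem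

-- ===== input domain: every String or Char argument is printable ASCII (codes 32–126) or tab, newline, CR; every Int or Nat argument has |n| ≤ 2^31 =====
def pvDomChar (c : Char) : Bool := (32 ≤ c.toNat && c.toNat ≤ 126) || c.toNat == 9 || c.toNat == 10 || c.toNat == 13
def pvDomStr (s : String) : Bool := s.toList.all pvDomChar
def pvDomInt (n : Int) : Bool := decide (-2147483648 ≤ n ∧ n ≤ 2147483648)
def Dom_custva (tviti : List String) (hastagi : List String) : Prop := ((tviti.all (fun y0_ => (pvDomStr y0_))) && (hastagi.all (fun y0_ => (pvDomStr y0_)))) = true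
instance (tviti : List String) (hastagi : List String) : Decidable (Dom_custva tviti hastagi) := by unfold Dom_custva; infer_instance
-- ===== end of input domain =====

-- B replaces A's (pair × query)-nested scan with re-sorting after every pair by an
-- inverted index hashtag→authors, a query-driven union and a single final sort.

-- shared helpers: tvit.split(sep) for a nonempty literal sep (split? is none only for sep = "")
def pvSplit (s : String) (sep : String) : List String := (PySem.Str.split? s sep).getD []
-- word[1:]
def pvTag (word : String) : String := PySem.Str.slice word (some 1) none

-- ===== PORT A =====
def custva (tviti : List String) (hastagi : List String) : List String :=
  -- first loop: hashtags.append((author, word[1:]));  temp_tvit[0] is total: split never returns []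
  let hashtags : List (String × String) :=
    tviti.foldl (fun hs tvit =>
      let author := (pvSplit tvit ":").headD ""
      (pvSplit tvit " ").foldl (fun hs word =>
        if PySem.Str.pyGet? word 0 = some '#' then hs ++ [(author, pvTag word)] else hs) hs) []
  -- second loop: for (aut, feeling) in hashtags: for x in hastagi: …; response = sorted(response)
  hashtags.foldl (fun response p =>
    PySem.List.sorted
      (hastagi.foldl (fun r x =>
        if p.2 = x then (if p.1 ∈ r then r else r ++ [p.1]) else r) response)
      id) []

-- ===== PORT B =====
def custva_alt (tviti : List String) (hastagi : List String) : List String :=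
  -- index.setdefault(word[1:], set()).add(author)  ==  index[tag] = index.get(tag, set()) ∪ {author}
  let index : PySem.Dict String (PySem.Set String) :=
    tviti.foldl (fun d tvit =>
      let author := (pvSplit tvit ":").headD ""
      (pvSplit tvit " ").foldl (fun d word =>
        if PySem.Str.pyGet? word 0 = some '#' then
          d.modify (pvTag word) PySem.Set.empty (fun s => PySem.Set.add s author)
        else d) d) PySem.Dict.empty
  -- result |= index.get(h, set()) for each queried h, then sorted(result)
  let result : PySem.Set String :=
    hastagi.foldl (fun s h => PySem.Set.union s (index.getD h PySem.Set.empty)) PySem.Set.empty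
  PySem.List.sorted result id

-- ===== PRECONDITION & SPEC =====
-- Pre_ excludes exactly the inputs where some tweet yields an empty word under split(" ")
-- (empty tweet, leading/trailing/double space): there Python A (and B) raise IndexError at word[0].
def Pre_custva (tviti : List String) (hastagi : List String) : Prop :=
  ∀ t ∈ tviti, ∀ w ∈ (PySem.Str.split? t " ").getD [], w ≠ ""
instance (tviti : List String) (hastagi : List String) : Decidable (Pre_custva tviti hastagi) := by
  unfold Pre_custva; infer_instance

def pvWitness_custva : List String × List String :=
  (["ann:hi #fun #x", "bob:#lean rocks"], ["fun", "lean", "zzz"])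

def Spec_custva (tviti : List String) (hastagi : List String) (out : List String) : Prop := out = custva_alt tviti hastagi
instance (tviti : List String) (hastagi : List String) (out : List String) : Decidable (Spec_custva tviti hastagi out) := by unfold Spec_custva; infer_instance

-- ===== CLAIM (what is proved, stated in full; the proofs are below) =====
def Claim_equal_custva : Prop := ∀ (tviti : List String) (hastagi : List String), Dom_custva tviti hastagi → Pre_custva tviti hastagi → Spec_custva tviti hastagi (custva tviti hastagi)

-- ===== LEMMAS AND PROOFS =====

-- the flat list of (author, hashtag) pairs both ports traverse, tweet by tweet, word by word
def pvFlatPairs (tviti : List String) : List (String × String) :=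
  tviti.flatMap (fun tvit =>
    ((pvSplit tvit " ").filter (fun w => decide (PySem.Str.pyGet? w 0 = some '#'))).map
      (fun w => ((pvSplit tvit ":").headD "", pvTag w)))

-- A's first loop builds exactly pvFlatPairs
lemma custva_pairs (tviti : List String) :
    (tviti.foldl (fun hs tvit =>
      let author := (pvSplit tvit ":").headD ""
      (pvSplit tvit " ").foldl (fun hs word =>
        if PySem.Str.pyGet? word 0 = some '#' then hs ++ [(author, pvTag word)] else hs) hs) [])
    = pvFlatPairs tviti := by
  have h : ∀ (acc : List (String × String)),
      (tviti.foldl (fun hs tvit =>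
        (pvSplit tvit " ").foldl (fun hs word =>
          if PySem.Str.pyGet? word 0 = some '#' then
            hs ++ [((pvSplit tvit ":").headD "", pvTag word)] else hs) hs) acc)
      = acc ++ pvFlatPairs tviti := by
    intro acc
    rw [show (fun (hs : List (String × String)) (tvit : String) =>
        (pvSplit tvit " ").foldl (fun hs word =>
          if PySem.Str.pyGet? word 0 = some '#' then
            hs ++ [((pvSplit tvit ":").headD "", pvTag word)] else hs) hs)
      = fun hs tvit => hs ++ ((pvSplit tvit " ").filter
            (fun w => decide (PySem.Str.pyGet? w 0 = some '#'))).map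
            (fun w => ((pvSplit tvit ":").headD "", pvTag w)) from ?_]
    · exact PySem.List.foldl_append_eq_flatMap _ tviti acc
    · funext hs tvit
      exact PySem.List.foldl_append_ite
        (fun w => PySem.Str.pyGet? w 0 = some '#') _ (pvSplit tvit " ") hs
  simpa using h []

-- A's inner query loop adds p.1 once iff p.2 is queried and p.1 is new
lemma custva_inner (hastagi : List String) (p : String × String) :
    ∀ r : List String,
      hastagi.foldl (fun r x =>
        if p.2 = x then (if p.1 ∈ r then r else r ++ [p.1]) else r) r
      = if p.2 ∈ hastagi ∧ p.1 ∉ r then r ++ [p.1] else r := by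
  induction hastagi with
  | nil => intro r; simp
  | cons x t ih =>
    intro r
    simp only [List.foldl_cons]
    by_cases hx : p.2 = x
    · simp only [if_pos hx]
      by_cases hm : p.1 ∈ r
      · rw [if_pos hm, ih r, if_neg (by simp [hm]), if_neg (by simp [hm])]
      · rw [if_neg hm, ih (r ++ [p.1]),
          if_neg (by simp), if_pos (by exact ⟨by simp [hx], hm⟩)]
    · rw [if_neg hx, ih r]
      have hmm : (p.2 ∈ x :: t) ↔ p.2 ∈ t := by simp [hx]
      simp only [hmm]

-- sorting a Nodup list gives a strictly sorted list with the same members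
lemma sorted_strict (s : List String) (hs : s.Nodup) :
    (PySem.List.sorted s id).Pairwise (· < ·) ∧ ∀ x, x ∈ PySem.List.sorted s id ↔ x ∈ s := by
  have hperm := PySem.List.sorted_perm s id false
  have hnd : (PySem.List.sorted s id).Nodup := hperm.nodup_iff.mpr hs
  have hle := PySem.List.sorted_pairwise s id
  refine ⟨(hle.and hnd).imp ?_, fun x => hperm.mem_iff⟩
  rintro a b ⟨h1, h2⟩
  exact lt_of_le_of_ne h1 h2

-- A's second loop: invariant = strictly sorted + membership characterisation
lemma custva_outer (hastagi : List String) :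
    ∀ (P : List (String × String)) (r : List String), r.Pairwise (· < ·) →
      (P.foldl (fun response p =>
        PySem.List.sorted
          (hastagi.foldl (fun r x =>
            if p.2 = x then (if p.1 ∈ r then r else r ++ [p.1]) else r) response)
          id) r).Pairwise (· < ·) ∧
      ∀ x, x ∈ (P.foldl (fun response p =>
        PySem.List.sorted
          (hastagi.foldl (fun r x =>
            if p.2 = x then (if p.1 ∈ r then r else r ++ [p.1]) else r) response)
          id) r) ↔ x ∈ r ∨ ∃ p ∈ P, p.1 = x ∧ p.2 ∈ hastagi := by
  intro P
  induction P with
  | nil => intro r hr; simpa using hr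
  | cons p t ih =>
    intro r hr
    simp only [List.foldl_cons]
    rw [custva_inner hastagi p r]
    set r' : List String := if p.2 ∈ hastagi ∧ p.1 ∉ r then r ++ [p.1] else r with hr'
    have hndr : r.Nodup := hr.imp (fun h => ne_of_lt h)
    have hnd' : r'.Nodup := by
      rw [hr']; split_ifs with h
      · exact List.Nodup.append hndr (List.nodup_singleton _) (by simpa using h.2)
      · exact hndr
    have hmem' : ∀ x, x ∈ r' ↔ x ∈ r ∨ (p.2 ∈ hastagi ∧ p.1 = x) := by
      intro x; rw [hr']; split_ifs with h
      · simp only [List.mem_append, List.mem_singleton]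
        constructor
        · rintro (hx | hx); · tauto
          · exact Or.inr ⟨h.1, hx.symm⟩
        · rintro (hx | hx); · tauto
          · exact Or.inr hx.2.symm
      · rw [not_and_or, not_not] at h
        constructor
        · tauto
        · rintro (hx | ⟨hq, hpx⟩); · exact hx
          · cases h with
            | inl h => exact absurd hq h
            | inr h => exact hpx ▸ h
    obtain ⟨hs1, hs2⟩ := sorted_strict r' hnd'
    obtain ⟨ih1, ih2⟩ := ih (PySem.List.sorted r' id) hs1
    refine ⟨ih1, fun x => ?_⟩
    rw [ih2 x, hs2 x, hmem' x]
    constructor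
    · rintro ((hx | ⟨hq, hpx⟩) | ⟨q, hq, hqx⟩)
      · tauto
      · exact Or.inr ⟨p, by simp, hpx, hq⟩
      · exact Or.inr ⟨q, by simp [hq], hqx⟩
    · rintro (hx | ⟨q, hq, hqx⟩)
      · tauto
      · rcases List.mem_cons.mp hq with h | h
        · exact Or.inl (Or.inr ⟨h ▸ hqx.2, h ▸ hqx.1⟩)
        · exact Or.inr ⟨q, h, hqx⟩

-- B's index build over the flat pair list
lemma index_mem (L : List (String × String)) :
    ∀ (d : PySem.Dict String (PySem.Set String)) (t a : String),
      a ∈ (L.foldl (fun d p => d.modify p.2 PySem.Set.empty (fun s => PySem.Set.add s p.1)) d).getD t PySem.Set.empty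
      ↔ a ∈ d.getD t PySem.Set.empty ∨ (a, t) ∈ L := by
  induction L with
  | nil => intro d t a; simp
  | cons p l ih =>
    intro d t a
    simp only [List.foldl_cons]
    rw [ih, PySem.Dict.getD_modify]
    simp only [List.mem_cons]
    by_cases ht : t = p.2
    · subst ht
      rw [if_pos rfl, PySem.Set.mem_add]
      constructor
      · rintro ((h | h) | h)
        · exact Or.inl h
        · exact Or.inr (Or.inl (by simp [h]))
        · exact Or.inr (Or.inr h)
      · rintro (h | h | h)
        · exact Or.inl (Or.inl h)
        · exact Or.inl (Or.inr (congrArg Prod.fst h))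
        · exact Or.inr h
    · rw [if_neg ht]
      constructor
      · rintro (h | h)
        · exact Or.inl h
        · exact Or.inr (Or.inr h)
      · rintro (h | h | h)
        · exact Or.inl h
        · exact absurd (congrArg Prod.snd h) ht
        · exact Or.inr h

-- B's build fold equals the fold over the flat pair list
lemma alt_index_eq (tviti : List String) :
    (tviti.foldl (fun d tvit =>
      let author := (pvSplit tvit ":").headD ""
      (pvSplit tvit " ").foldl (fun d word =>
        if PySem.Str.pyGet? word 0 = some '#' then
          d.modify (pvTag word) PySem.Set.empty (fun s => PySem.Set.add s author)
        else d) d) PySem.Dict.empty)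
    = (pvFlatPairs tviti).foldl
        (fun d p => d.modify p.2 PySem.Set.empty (fun s => PySem.Set.add s p.1)) PySem.Dict.empty := by
  unfold pvFlatPairs
  rw [List.foldl_flatMap]
  apply PySem.List.foldl_congr_mem
  intro d tvit _
  rw [List.foldl_map]
  exact PySem.List.foldl_ite_eq_foldl_filter (fun w => PySem.Str.pyGet? w 0 = some '#')
    (fun d word => d.modify (pvTag word) PySem.Set.empty
      (fun s => PySem.Set.add s ((pvSplit tvit ":").headD ""))) (pvSplit tvit " ") d

-- B's query fold: membership and nodup
lemma query_mem (index : PySem.Dict String (PySem.Set String)) (hs : List String) :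
    ∀ (acc : PySem.Set String) (x : String),
      x ∈ hs.foldl (fun s h => PySem.Set.union s (index.getD h PySem.Set.empty)) acc
      ↔ x ∈ acc ∨ ∃ h ∈ hs, x ∈ index.getD h PySem.Set.empty := by
  induction hs with
  | nil => intro acc x; simp
  | cons h t ih =>
    intro acc x
    simp only [List.foldl_cons]
    rw [ih, PySem.Set.mem_union]
    constructor
    · rintro ((hx | hx) | ⟨q, hq, hqx⟩)
      · tauto
      · exact Or.inr ⟨h, by simp, hx⟩
      · exact Or.inr ⟨q, by simp [hq], hqx⟩
    · rintro (hx | ⟨q, hq, hqx⟩)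
      · tauto
      · rcases List.mem_cons.mp hq with h1 | h1
        · exact Or.inl (Or.inr (h1 ▸ hqx))
        · exact Or.inr ⟨q, h1, hqx⟩

lemma query_nodup (index : PySem.Dict String (PySem.Set String)) (hs : List String) :
    ∀ (acc : PySem.Set String), acc.Nodup →
      (hs.foldl (fun s h => PySem.Set.union s (index.getD h PySem.Set.empty)) acc).Nodup := by
  induction hs with
  | nil => intro acc h; exact h
  | cons h t ih =>
    intro acc hacc
    simp only [List.foldl_cons]
    exact ih _ (PySem.Set.nodup_union _ _ hacc)

-- two strictly sorted lists with the same members are equal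
lemma eq_of_strict_mem (l₁ l₂ : List String)
    (h₁ : l₁.Pairwise (· < ·)) (h₂ : l₂.Pairwise (· < ·))
    (hm : ∀ x, x ∈ l₁ ↔ x ∈ l₂) : l₁ = l₂ := by
  have hp : l₁.Perm l₂ :=
    (List.perm_ext_iff_of_nodup (h₁.imp ne_of_lt) (h₂.imp ne_of_lt)).mpr hm
  exact List.Perm.eq_of_pairwise (fun a b _ _ h1 h2 => absurd h2 (not_lt_of_gt h1)) h₁ h₂ hp

-- ===== VERDICT (by name: the statement is the Claim_ definition above) =====
theorem custva_spec : Claim_equal_custva := by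
  intro tviti hastagi _ _
  unfold Spec_custva custva custva_alt
  simp only []
  rw [custva_pairs, alt_index_eq]
  set L := pvFlatPairs tviti with hL
  obtain ⟨hA1, hA2⟩ := custva_outer hastagi L [] (by simp)
  set idx := L.foldl (fun d p => d.modify p.2 PySem.Set.empty (fun s => PySem.Set.add s p.1))
      PySem.Dict.empty with hidx
  set res := hastagi.foldl (fun s h => PySem.Set.union s (idx.getD h PySem.Set.empty))
      PySem.Set.empty with hres
  have hrn : res.Nodup := query_nodup idx hastagi PySem.Set.empty (by simp [PySem.Set.empty])
  obtain ⟨hB1, hB2⟩ := sorted_strict res hrn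
  apply eq_of_strict_mem _ _ hA1 hB1
  intro x
  rw [hA2 x, hB2 x, hres, query_mem idx hastagi PySem.Set.empty x]
  constructor
  · rintro (h | ⟨p, hp, hx, hq⟩)
    · simp at h
    · refine Or.inr ⟨p.2, hq, ?_⟩
      rw [hidx, index_mem L PySem.Dict.empty p.2 x]
      exact Or.inr (hx ▸ hp)
  · rintro (h | ⟨h, hh, hx⟩)
    · simp at h
    · rw [hidx, index_mem L PySem.Dict.empty h x] at hx
      rcases hx with hx | hx
      · simp [PySem.Dict.getD_empty, PySem.Set.empty] at hx
      · exact Or.inr ⟨(x, h), hx, rfl, hh⟩
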